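-- pv_equiv track=rewrite | github.com/kaija/template-backend-api-python | src/monitoring/sentry.py | contains_sensitive_pattern
-- ===== SOURCE A (Python) =====
-- def contains_sensitive_pattern(value: str) -> bool:
--     """
--     Check if value contains sensitive patterns.
--
--     Args:
--         value: Value to check
--
--     Returns:
--         True if value contains sensitive patterns
--     """
--     sensitive_patterns = [
--         "bearer ",
--         "basic ",
--         "token=",
--         "key=",
--         "password=",
--         "secret=",
--         "jwt",
--     ]
--
--     value_lower = value.lower()
--     return any(pattern in value_lower for pattern in sensitive_patterns)
-- ===== SOURCE B (Python) =====
-- def contains_sensitive_pattern(value: str) -> bool: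
--     """Single left-to-right scan: at each position test whether any
--     sensitive pattern starts there, instead of seven separate substring scans."""
--     patterns = ("bearer ", "basic ", "token=", "key=", "password=", "secret=", "jwt")
--     v = value.lower()
--     for i in range(len(v)):
--         if any(v.startswith(p, i) for p in patterns):
--             return True
--     return False
-- ===== Notes on version B (the rewrite author's own statement) =====
-- stated objective: alternative
-- what changed: Replaces seven independent substring scans ('pattern in value_lower' via any) with one left-to-right scan that tests at each position whether any pattern starts there.
import Mathlib
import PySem

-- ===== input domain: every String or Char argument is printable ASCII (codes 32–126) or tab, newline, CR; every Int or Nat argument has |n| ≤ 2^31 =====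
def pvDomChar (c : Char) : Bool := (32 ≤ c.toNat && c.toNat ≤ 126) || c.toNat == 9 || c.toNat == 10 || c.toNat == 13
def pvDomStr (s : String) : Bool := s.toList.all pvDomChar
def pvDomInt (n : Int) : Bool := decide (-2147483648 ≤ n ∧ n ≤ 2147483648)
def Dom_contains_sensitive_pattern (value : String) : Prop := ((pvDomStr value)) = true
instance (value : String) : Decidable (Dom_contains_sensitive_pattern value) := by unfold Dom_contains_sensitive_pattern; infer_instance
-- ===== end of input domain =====

-- ===== PORT A =====
-- B changes the traversal: one scan of the string testing pattern prefixes at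
-- each position, instead of seven separate substring-containment scans (alternative).
def pvPatterns : List (List Char) :=
  ["bearer ".toList, "basic ".toList, "token=".toList, "key=".toList,
   "password=".toList, "secret=".toList, "jwt".toList]

def contains_sensitive_pattern (value : String) : Bool :=
  let value_lower := PySem.Str.lower value
  pvPatterns.any (fun p => PySem.Chars.isIn p value_lower.toList)

-- ===== PORT B =====
-- the loop 'for i in range(len(v)): if any(v.startswith(p, i) ...)' as structural
-- recursion over the suffixes of v
def pvScan : List Char → Bool
  | [] => false
  | c :: rest =>
      pvPatterns.any (fun p => PySem.Chars.startswith (c :: rest) p) || pvScan rest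

def contains_sensitive_pattern_alt (value : String) : Bool :=
  pvScan (PySem.Str.lower value).toList

-- ===== PRECONDITION & SPEC =====
def Spec_contains_sensitive_pattern (value : String) (out : Bool) : Prop := out = contains_sensitive_pattern_alt value
instance (value : String) (out : Bool) : Decidable (Spec_contains_sensitive_pattern value out) := by unfold Spec_contains_sensitive_pattern; infer_instance

-- ===== CLAIM (what is proved, stated in full; the proofs are below) =====
def Claim_equal_contains_sensitive_pattern : Prop := ∀ (value : String), Dom_contains_sensitive_pattern value → Spec_contains_sensitive_pattern value (contains_sensitive_pattern value)

-- ===== LEMMAS AND PROOFS =====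

-- ===== VERDICT (by name: the statement is the Claim_ definition above) =====
-- every fixed pattern is nonempty
lemma pvPatterns_ne_nil : ∀ p ∈ pvPatterns, p ≠ [] := by decide

-- the single-position scan finds exactly the patterns occurring as an infix
lemma pvScan_eq_any_isIn (l : List Char) :
    pvScan l = pvPatterns.any (fun p => PySem.Chars.isIn p l) := by
  induction l with
  | nil =>
      simp only [pvScan]
      symm
      simp only [List.any_eq_false, PySem.Chars.isIn_iff_infix]
      intro p hp h
      exact pvPatterns_ne_nil p hp (List.eq_nil_of_infix_nil h)
  | cons c rest ih =>
      simp only [pvScan, ih]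
      rw [Bool.eq_iff_iff]
      simp only [Bool.or_eq_true, List.any_eq_true, PySem.Chars.isIn_iff_infix,
        PySem.Chars.startswith_iff, List.infix_cons_iff]
      constructor
      · rintro (⟨p, hp, h⟩ | ⟨p, hp, h⟩)
        · exact ⟨p, hp, Or.inl h⟩
        · exact ⟨p, hp, Or.inr h⟩
      · rintro ⟨p, hp, h | h⟩
        · exact Or.inl ⟨p, hp, h⟩
        · exact Or.inr ⟨p, hp, h⟩

-- ===== VERDICT =====
theorem contains_sensitive_pattern_spec : Claim_equal_contains_sensitive_pattern := by
  intro value _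
  unfold Spec_contains_sensitive_pattern contains_sensitive_pattern contains_sensitive_pattern_alt
  rw [pvScan_eq_any_isIn]
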